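-- pv_equiv track=rewrite | github.com/nehasaini-git/neha_first_behave | rough.py | solution
-- ===== SOURCE A (Python) =====
-- def solution(X, Y, A):
--     N = len(A)
--     result = -1
--     nX = 0
--     nY = 0
--     for i in range(N):
--         if A[i] == X:
--             nX += 1
--         elif A[i] == Y:
--             nY += 1
--         if nX == nY:
--             result = i
--         if nX == 0 and nY == 0:
--             result = -1
--     return result
-- ===== SOURCE B (Python) =====
-- def solution(X, Y, A):
--     # Precompute prefix balances (+1 for X, -1 for Y, elif-style), then scan
--     # backward from the end down to the first X/Y occurrence, returning early.
--     bal = []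
--     b = 0
--     for a in A:
--         if a == X:
--             b += 1
--         elif a == Y:
--             b -= 1
--         bal.append(b)
--     f = next((i for i, a in enumerate(A) if a == X or a == Y), -1)
--     if f == -1:
--         return -1
--     return next((i for i in range(len(A) - 1, f - 1, -1) if bal[i] == 0), -1)
-- ===== Notes on version B (the rewrite author's own statement) =====
-- stated objective: alternative
-- what changed: A's single forward pass that overwrites the result at every balance-equality and resets it while no X/Y has been seen is replaced by precomputing the prefix-balance array and the first X/Y position, then scanning backward from the end with an early return at the first zero balance.
import Mathlib
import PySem

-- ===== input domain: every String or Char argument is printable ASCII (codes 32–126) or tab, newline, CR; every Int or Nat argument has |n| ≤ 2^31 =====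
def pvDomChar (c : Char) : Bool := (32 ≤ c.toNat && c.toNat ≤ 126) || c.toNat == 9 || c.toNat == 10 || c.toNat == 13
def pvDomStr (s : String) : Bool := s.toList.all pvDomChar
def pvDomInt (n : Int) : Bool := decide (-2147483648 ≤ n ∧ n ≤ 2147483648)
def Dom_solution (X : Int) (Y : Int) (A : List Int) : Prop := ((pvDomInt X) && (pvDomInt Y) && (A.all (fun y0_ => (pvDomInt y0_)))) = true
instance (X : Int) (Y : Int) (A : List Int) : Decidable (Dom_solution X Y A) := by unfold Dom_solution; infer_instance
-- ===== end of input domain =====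

-- B replaces A's forward overwrite-on-every-zero pass by: precompute the prefix
-- balance array and the first X/Y position, then scan backward with early return
-- (objective: alternative decomposition, same asymptotic cost).

-- ===== PORT A =====
def solution (X : Int) (Y : Int) (A : List Int) : Int :=
  -- N = len(A); result = -1; nX = 0; nY = 0; for i in range(N): ...
  ((PySem.List.pyRange 0 (A.length : Int) 1).foldl
    (fun (s : Int × Int × Int) (i : Int) =>
      let a := PySem.List.pyGetD A i 0   -- A[i]; i ∈ range(N) is always in range
      let nX : Int := if a = X then s.2.1 + 1 else s.2.1
      let nY : Int := if a ≠ X ∧ a = Y then s.2.2 + 1 else s.2.2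
      let r1 : Int := if nX = nY then i else s.1
      ((if nX = 0 ∧ nY = 0 then (-1 : Int) else r1), nX, nY))
    ((-1 : Int), 0, 0)).1

-- ===== PORT B =====
def solution_alt (X : Int) (Y : Int) (A : List Int) : Int :=
  -- bal = []; b = 0; for a in A: b += ±1/0; bal.append(b)
  let bal : List Int :=
    (A.foldl
      (fun (s : List Int × Int) (a : Int) =>
        let b : Int := if a = X then s.2 + 1 else if a = Y then s.2 - 1 else s.2
        (s.1 ++ [b], b))
      (([] : List Int), 0)).1
  -- f = next((i for i, a in enumerate(A) if a == X or a == Y), -1)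
  let f : Int :=
    match (PySem.List.enumerate A 0).find? (fun q => q.2 == X || q.2 == Y) with
    | some q => q.1
    | none => -1
  if f == -1 then -1
  else
    -- return next((i for i in range(len(A)-1, f-1, -1) if bal[i] == 0), -1)
    match (PySem.List.pyRange ((A.length : Int) - 1) (f - 1) (-1)).find?
        (fun i => PySem.List.pyGetD bal i 0 == 0) with
    | some i => i
    | none => -1

-- ===== PRECONDITION & SPEC =====
def Spec_solution (X : Int) (Y : Int) (A : List Int) (out : Int) : Prop := out = solution_alt X Y A
instance (X : Int) (Y : Int) (A : List Int) (out : Int) : Decidable (Spec_solution X Y A out) := by unfold Spec_solution; infer_instance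

-- ===== CLAIM (what is proved, stated in full; the proofs are below) =====
def Claim_equal_solution : Prop := ∀ (X : Int) (Y : Int) (A : List Int), Dom_solution X Y A → Spec_solution X Y A (solution X Y A)

-- ===== LEMMAS AND PROOFS =====

-- A's loop body, over an enumerated pair (i, A[i])
def stepA (X Y : Int) (s : Int × Int × Int) (p : Int × Int) : Int × Int × Int :=
  let nX : Int := if p.2 = X then s.2.1 + 1 else s.2.1
  let nY : Int := if p.2 ≠ X ∧ p.2 = Y then s.2.2 + 1 else s.2.2
  let r1 : Int := if nX = nY then p.1 else s.1
  ((if nX = 0 ∧ nY = 0 then (-1 : Int) else r1), nX, nY)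

-- B's balance step and the list of prefix balances starting from b
def stepB (X Y b a : Int) : Int := if a = X then b + 1 else if a = Y then b - 1 else b

def balFrom (X Y b : Int) : List Int → List Int
  | [] => []
  | a :: t => stepB X Y b a :: balFrom X Y (stepB X Y b a) t

def endB (X Y b : Int) (A : List Int) : Int := A.foldl (stepB X Y) b

-- counters after the whole list, as A maintains them
def cX (X : Int) (A : List Int) : Int := (A.countP (fun a => a == X) : Nat)
def cY (X Y : Int) (A : List Int) : Int := (A.countP (fun a => !(a == X) && a == Y) : Nat)

lemma find?_congr_mem {α : Type} (p q : α → Bool) (l : List α)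
    (h : ∀ x ∈ l, p x = q x) : List.find? p l = List.find? q l := by
  induction l with
  | nil => rfl
  | cons a t ih =>
    simp only [List.find?, h a (by simp)]
    cases q a with
    | true => rfl
    | false => exact ih (fun x hx => h x (by simp [hx]))

lemma solution_eq_enumfold (X Y : Int) (A : List Int) :
    solution X Y A = ((PySem.List.enumerate A 0).foldl (stepA X Y) ((-1 : Int), 0, 0)).1 := by
  unfold solution
  rw [PySem.List.enumerate_eq_map_pyRange A 0, List.foldl_map]
  rfl

lemma balfold (X Y : Int) (A : List Int) : ∀ (acc : List Int) (b : Int),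
    A.foldl
      (fun (s : List Int × Int) (a : Int) =>
        let v : Int := if a = X then s.2 + 1 else if a = Y then s.2 - 1 else s.2
        (s.1 ++ [v], v))
      (acc, b) = (acc ++ balFrom X Y b A, endB X Y b A) := by
  induction A with
  | nil => intro acc b; simp [balFrom, endB]
  | cons a t ih =>
    intro acc b
    simp only [List.foldl_cons]
    rw [ih]
    simp [balFrom, endB, stepB]

lemma length_balFrom (X Y b : Int) (A : List Int) : (balFrom X Y b A).length = A.length := by
  induction A generalizing b with
  | nil => rfl
  | cons a t ih => simp [balFrom, ih]

lemma balFrom_append (X Y b : Int) (A : List Int) (a : Int) :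
    balFrom X Y b (A ++ [a]) = balFrom X Y b A ++ [stepB X Y (endB X Y b A) a] := by
  induction A generalizing b with
  | nil => simp [balFrom, endB]
  | cons x t ih =>
    show stepB X Y b x :: balFrom X Y (stepB X Y b x) (t ++ [a]) = _
    rw [ih]
    simp [balFrom, endB]

lemma endB_eq (X Y b : Int) (A : List Int) : endB X Y b A = b + cX X A - cY X Y A := by
  induction A generalizing b with
  | nil => simp [endB, cX, cY]
  | cons a t ih =>
    simp only [endB, List.foldl_cons] at *
    rw [ih]
    simp only [cX, cY, stepB, List.countP_cons]
    by_cases hx : a = X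
    · simp [hx]; ring
    · by_cases hy : a = Y
      · simp [hy, show ¬(Y = X) from hy ▸ hx]
        ring
      · simp [hx, hy]

lemma pyGetD_append_lt (l l' : List Int) (i : Int) (d : Int) (h0 : 0 ≤ i) (h : i < l.length) :
    PySem.List.pyGetD (l ++ l') i d = PySem.List.pyGetD l i d := by
  have : i = ((i.toNat : Nat) : Int) := by omega
  rw [this, PySem.List.pyGetD_natCast, PySem.List.pyGetD_natCast]
  exact List.getD_append l l' d i.toNat (by omega)

lemma pyGetD_concat_length (l : List Int) (w d : Int) :
    PySem.List.pyGetD (l ++ [w]) (l.length : Int) d = w := by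
  rw [PySem.List.pyGetD_natCast]
  simp [List.getD]

lemma findXY_none_iff (X Y : Int) (A : List Int) (s : Int) :
    (PySem.List.enumerate A s).find? (fun q => q.2 == X || q.2 == Y) = none ↔
      ∀ a ∈ A, ¬(a = X ∨ a = Y) := by
  rw [List.find?_eq_none]
  constructor
  · intro h a ha
    obtain ⟨k, hk, rfl⟩ := List.mem_iff_getElem.mp ha
    have := h (s + k, A[k]) (by rw [PySem.List.mem_enumerate_iff]; exact ⟨k, hk, rfl⟩)
    simpa using this
  · intro h p hp
    rw [PySem.List.mem_enumerate_iff] at hp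
    obtain ⟨k, hk, rfl⟩ := hp
    have := h A[k] (List.getElem_mem hk)
    simpa using this

lemma counts_zero_iff (X Y : Int) (A : List Int) :
    (cX X A = 0 ∧ cY X Y A = 0) ↔ ∀ a ∈ A, ¬(a = X ∨ a = Y) := by
  simp only [cX, cY, Nat.cast_eq_zero, List.countP_eq_zero]
  constructor
  · rintro ⟨h1, h2⟩ a ha
    have t1 := h1 a ha
    have t2 := h2 a ha
    simp at t1 t2
    tauto
  · intro h
    refine ⟨fun a ha => ?_, fun a ha => ?_⟩ <;> have := h a ha <;> simp <;> tauto

lemma cX_snoc (X : Int) (A : List Int) (a : Int) :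
    cX X (A ++ [a]) = if a = X then cX X A + 1 else cX X A := by
  simp only [cX, List.countP_append, List.countP_cons, List.countP_nil]
  by_cases hx : a = X <;> simp [hx]

lemma cY_snoc (X Y : Int) (A : List Int) (a : Int) :
    cY X Y (A ++ [a]) = if ¬a = X ∧ a = Y then cY X Y A + 1 else cY X Y A := by
  simp only [cY, List.countP_append, List.countP_cons, List.countP_nil]
  by_cases hx : a = X
  · simp [hx]
  · by_cases hy : a = Y
    · simp [hy, show ¬(Y = X) from hy ▸ hx]
    · simp [hx, hy]

-- solution_alt, with its pieces named (bal is balFrom, f is the find? result)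
lemma alt_eq (X Y : Int) (A : List Int) :
    solution_alt X Y A =
      (match (PySem.List.enumerate A 0).find? (fun q => q.2 == X || q.2 == Y) with
       | none => (-1 : Int)
       | some q =>
         match (PySem.List.pyRange ((A.length : Int) - 1) (q.1 - 1) (-1)).find?
            (fun i => PySem.List.pyGetD (balFrom X Y 0 A) i 0 == 0) with
         | some i => i
         | none => -1) := by
  unfold solution_alt
  rw [balfold]
  simp only [List.nil_append]
  cases hf : (PySem.List.enumerate A 0).find? (fun q => q.2 == X || q.2 == Y) with
  | none => simp
  | some q =>
    obtain ⟨k, hk, rfl⟩ := (PySem.List.mem_enumerate_iff _ _ _).mp (List.mem_of_find?_eq_some hf)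
    simp only [zero_add]
    have : (((k : Int)) == (-1 : Int)) = false := by simp
    rw [this]
    simp

-- one step of B's answer when an element is appended
lemma alt_snoc (X Y : Int) (A : List Int) (a : Int) :
    solution_alt X Y (A ++ [a]) =
      if cX X (A ++ [a]) = 0 ∧ cY X Y (A ++ [a]) = 0 then -1
      else if cX X (A ++ [a]) = cY X Y (A ++ [a]) then (A.length : Int)
      else solution_alt X Y A := by
  have henum : PySem.List.enumerate (A ++ [a]) 0
      = PySem.List.enumerate A 0 ++ [((A.length : Int), a)] := by
    simp [PySem.List.enumerate_append, PySem.List.enumerate_cons, PySem.List.enumerate_nil]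
  rw [alt_eq, alt_eq, henum, List.find?_append]
  cases hf : (PySem.List.enumerate A 0).find? (fun q => q.2 == X || q.2 == Y) with
  | none =>
    have hzero : cX X A = 0 ∧ cY X Y A = 0 :=
      (counts_zero_iff X Y A).mpr ((findXY_none_iff X Y A 0).mp hf)
    have hend : endB X Y 0 A = 0 := by rw [endB_eq]; omega
    by_cases hhit : a = X ∨ a = Y
    · have hpred : (fun (q : Int × Int) => q.2 == X || q.2 == Y) ((A.length : Int), a) = true := by
        rcases hhit with h | h <;> simp [h]
      simp only [Option.none_or, List.find?_cons, hpred]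
      have hlen : ((A ++ [a]).length : Int) - 1 = (A.length : Int) := by simp
      rw [hlen, PySem.List.pyRange_neg_one_cons (by omega),
        PySem.List.pyRange_neg_one_eq_nil (by omega)]
      have hbal : PySem.List.pyGetD (balFrom X Y 0 (A ++ [a])) ((A.length : Int)) 0
          = stepB X Y 0 a := by
        rw [balFrom_append, hend, ← length_balFrom X Y 0 A, pyGetD_concat_length]
      have hstep : ¬ stepB X Y 0 a = 0 := by
        rcases hhit with h | h
        · simp [stepB, h]
        · by_cases hx : a = X
          · simp [stepB, hx]
          · simp [stepB, h, show ¬(Y = X) from h ▸ hx]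
      simp only [List.find?_cons, hbal, List.find?_nil]
      have : (stepB X Y 0 a == (0 : Int)) = false := by simpa using hstep
      rw [this]
      rw [cX_snoc, cY_snoc]
      by_cases hx : a = X
      · simp [hx, hzero.1, hzero.2]
      · have hy : a = Y := by tauto
        simp [hy, hzero.1, hzero.2, show ¬(Y = X) from hy ▸ hx]
    · have hx : ¬a = X := fun h => hhit (Or.inl h)
      have hy : ¬a = Y := fun h => hhit (Or.inr h)
      have hpred : (fun (q : Int × Int) => q.2 == X || q.2 == Y) ((A.length : Int), a) = false := by
        simp [hx, hy]
      simp only [Option.none_or, List.find?_cons, hpred, List.find?_nil]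
      rw [cX_snoc, cY_snoc]
      simp [hx, hy, hzero.1, hzero.2]
  | some q =>
    obtain ⟨k, hk, rfl⟩ := (PySem.List.mem_enumerate_iff _ _ _).mp (List.mem_of_find?_eq_some hf)
    have hhit : A[k] = X ∨ A[k] = Y := by
      have := List.find?_some hf
      simpa using this
    have hnz : ¬(cX X (A ++ [a]) = 0 ∧ cY X Y (A ++ [a]) = 0) := by
      intro hz
      exact (counts_zero_iff X Y (A ++ [a])).mp hz A[k]
        (List.mem_append_left _ (List.getElem_mem hk)) hhit
    have hw : PySem.List.pyGetD (balFrom X Y 0 (A ++ [a])) ((A.length : Int)) 0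
        = cX X (A ++ [a]) - cY X Y (A ++ [a]) := by
      rw [balFrom_append, ← length_balFrom X Y 0 A, pyGetD_concat_length]
      have : stepB X Y (endB X Y 0 A) a = endB X Y 0 (A ++ [a]) := by
        simp [endB, List.foldl_append]
      rw [this, endB_eq]; ring
    have hlen : ((A ++ [a]).length : Int) - 1 = (A.length : Int) := by simp
    simp only [Option.some_or, zero_add]
    rw [hlen, PySem.List.pyRange_neg_one_cons (by omega)]
    simp only [List.find?_cons, hw]
    by_cases hzero : cX X (A ++ [a]) - cY X Y (A ++ [a]) = 0
    · have : (cX X (A ++ [a]) - cY X Y (A ++ [a]) == (0 : Int)) = true := by simpa using hzero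
      rw [this]
      simp only [if_neg hnz, if_pos (by omega : cX X (A ++ [a]) = cY X Y (A ++ [a]))]
    · have : (cX X (A ++ [a]) - cY X Y (A ++ [a]) == (0 : Int)) = false := by simpa using hzero
      rw [this]
      rw [if_neg hnz, if_neg (by omega : ¬ cX X (A ++ [a]) = cY X Y (A ++ [a]))]
      have hcongr : (PySem.List.pyRange ((A.length : Int) - 1) ((k : Int) - 1) (-1)).find?
            (fun i => PySem.List.pyGetD (balFrom X Y 0 (A ++ [a])) i 0 == 0)
          = (PySem.List.pyRange ((A.length : Int) - 1) ((k : Int) - 1) (-1)).find?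
            (fun i => PySem.List.pyGetD (balFrom X Y 0 A) i 0 == 0) := by
        apply find?_congr_mem
        intro i hi
        rw [PySem.List.mem_pyRange_neg_one] at hi
        rw [balFrom_append, pyGetD_append_lt _ _ _ _ (by omega)
          (by rw [length_balFrom]; omega)]
      rw [hcongr]

-- the main invariant: A's fold state is (B's answer, A's two counters)
lemma mainInv (X Y : Int) (A : List Int) :
    ((PySem.List.enumerate A 0).foldl (stepA X Y) ((-1 : Int), 0, 0)) =
      (solution_alt X Y A, cX X A, cY X Y A) := by
  induction A using List.reverseRecOn with
  | nil => rfl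
  | append_singleton A a ih =>
    rw [show PySem.List.enumerate (A ++ [a]) 0 = PySem.List.enumerate A 0 ++ [((A.length : Int), a)] by
      simp [PySem.List.enumerate_append, PySem.List.enumerate_cons, PySem.List.enumerate_nil]]
    rw [List.foldl_append, ih]
    simp only [List.foldl_cons, List.foldl_nil]
    rw [alt_snoc, cX_snoc, cY_snoc]
    simp [stepA]

-- ===== VERDICT (by name: the statement is the Claim_ definition above) =====
theorem solution_spec : Claim_equal_solution := by
  intro X Y A _
  show solution X Y A = solution_alt X Y A
  rw [solution_eq_enumfold, mainInv]
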